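-- pv_equiv track=rewrite | github.com/w1ll-farmer/backgammon | Code/turn.py | convert_point
-- ===== SOURCE A (Python) =====
-- def convert_point(point):
--     base = [0]* 10
--     if point < 0:
--         for i in range(0, 5):
--             if point <= i-5 and (i == 0 or i == 3) or point == i-5:
--                 base[i] = 1
--     elif point > 0:
--         for i in range(5, 10):
--             if point >= i - 4 and (i == 9 or i == 6) or point == i-4:
--                 base[i] = 1
--     return base
-- ===== SOURCE B (Python) =====
-- def convert_point(point):
--     base = [0] * 10
--     if point < 0:
--         if -5 <= point:
--             base[point + 5] = 1
--         if point <= -5: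
--             base[0] = 1
--         if point <= -2:
--             base[3] = 1
--     elif point > 0:
--         if point <= 5:
--             base[point + 4] = 1
--         if point >= 5:
--             base[9] = 1
--         if point >= 2:
--             base[6] = 1
--     return base
-- ===== Notes on version B (the rewrite author's own statement) =====
-- stated objective: simpler
-- what changed: Replaced the range(5) scans with three direct conditional assignments per sign: an equality bit at index point+5 (resp. point+4) and saturating threshold bits at indices 0 and 3 (resp. 9 and 6), computed in closed form.
import Mathlib
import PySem

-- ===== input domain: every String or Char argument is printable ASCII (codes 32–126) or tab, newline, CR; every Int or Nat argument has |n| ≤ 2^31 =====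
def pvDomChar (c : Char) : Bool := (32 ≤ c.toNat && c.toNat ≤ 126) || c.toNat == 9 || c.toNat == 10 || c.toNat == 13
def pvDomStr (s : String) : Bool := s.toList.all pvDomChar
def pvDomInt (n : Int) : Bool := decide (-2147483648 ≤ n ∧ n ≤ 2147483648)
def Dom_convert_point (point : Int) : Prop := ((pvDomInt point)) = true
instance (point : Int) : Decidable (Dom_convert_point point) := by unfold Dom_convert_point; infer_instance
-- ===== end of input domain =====

-- B replaces A's two range(5) scans by three direct conditional bit assignments per sign (simpler).

-- ===== PORT A =====
def convert_point (point : Int) : List Int :=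
  let base := List.replicate 10 (0 : Int)
  if point < 0 then
    (PySem.List.pyRange 0 5 1).foldl
      (fun b i =>
        if (point ≤ i - 5 ∧ (i = 0 ∨ i = 3)) ∨ point = i - 5 then PySem.List.pySetD b i 1 else b)
      base
  else if point > 0 then
    (PySem.List.pyRange 5 10 1).foldl
      (fun b i =>
        if (point ≥ i - 4 ∧ (i = 9 ∨ i = 6)) ∨ point = i - 4 then PySem.List.pySetD b i 1 else b)
      base
  else base

-- ===== PORT B =====
def convert_point_alt (point : Int) : List Int :=
  let base := List.replicate 10 (0 : Int)
  if point < 0 then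
    let b1 := if -5 ≤ point then PySem.List.pySetD base (point + 5) 1 else base
    let b2 := if point ≤ -5 then PySem.List.pySetD b1 0 1 else b1
    if point ≤ -2 then PySem.List.pySetD b2 3 1 else b2
  else if point > 0 then
    let b1 := if point ≤ 5 then PySem.List.pySetD base (point + 4) 1 else base
    let b2 := if point ≥ 5 then PySem.List.pySetD b1 9 1 else b1
    if point ≥ 2 then PySem.List.pySetD b2 6 1 else b2
  else base

-- ===== PRECONDITION & SPEC =====
def Spec_convert_point (point : Int) (out : List Int) : Prop := out = convert_point_alt point
instance (point : Int) (out : List Int) : Decidable (Spec_convert_point point out) := by unfold Spec_convert_point; infer_instance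

-- ===== CLAIM (what is proved, stated in full; the proofs are below) =====
def Claim_equal_convert_point : Prop := ∀ (point : Int), Dom_convert_point point → Spec_convert_point point (convert_point point)

-- ===== LEMMAS AND PROOFS =====

set_option maxHeartbeats 2000000 in
theorem convert_point_eq_alt (point : Int) : convert_point point = convert_point_alt point := by
  by_cases h1 : point ≤ -6
  · unfold convert_point convert_point_alt
    rw [show PySem.List.pyRange 0 5 1 = [0, 1, 2, 3, 4] from by decide,
        show PySem.List.pyRange 5 10 1 = [5, 6, 7, 8, 9] from by decide]
    simp only [List.foldl, true_or, or_true, and_true]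
    split_ifs <;> first | rfl | omega
  · by_cases h2 : 6 ≤ point
    · unfold convert_point convert_point_alt
      rw [show PySem.List.pyRange 0 5 1 = [0, 1, 2, 3, 4] from by decide,
          show PySem.List.pyRange 5 10 1 = [5, 6, 7, 8, 9] from by decide]
      simp only [List.foldl, true_or, or_true, and_true]
      split_ifs <;> first | rfl | omega
    · have hl : -5 ≤ point := by omega
      have hu : point ≤ 5 := by omega
      interval_cases point <;> decide

-- ===== VERDICT (by name: the statement is the Claim_ definition above) =====
theorem convert_point_spec : Claim_equal_convert_point := by
  intro point _
  exact convert_point_eq_alt point
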